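-- pv_equiv track=rewrite | github.com/USTC-Hackergame/hackergame2022-writeups | players/Testla/19-置换魔群/3.py | make_generator
-- ===== SOURCE A (Python) =====
-- import typing
--
-- def make_generator(lengths: typing.Sequence[int], n: int) -> typing.List[int]:
--     l = []
--     begin = 0
--     for length in lengths:
--         for i in range(length):
--             l.append((i + 1) % length + begin + 1)
--         begin += length
--     for i in range(len(l), n):
--         l.append(i + 1)
--     return l
-- ===== SOURCE B (Python) =====
-- def make_generator(lengths, n):
--     out = []
--     begin = 0
--     for length in lengths:
--         seg = list(range(begin + 1, begin + length + 1))  # identity block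
--         out += seg[1:] + seg[:1]                          # rotated left by one
--         begin += length
--     out += range(len(out) + 1, max(n, len(out)) + 1)      # identity tail
--     return out
-- ===== Notes on version B (the rewrite author's own statement) =====
-- stated objective: alternative
-- what changed: B builds each cycle's block by materialising the identity segment range(begin+1, begin+length+1) and rotating it left by one with slicing (seg[1:] + seg[:1]) instead of A's inner per-element loop computing (i+1)%length, and emits the fixed-point tail as one range up to max(n, len(out)) instead of an index-by-index append loop.
import Mathlib
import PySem

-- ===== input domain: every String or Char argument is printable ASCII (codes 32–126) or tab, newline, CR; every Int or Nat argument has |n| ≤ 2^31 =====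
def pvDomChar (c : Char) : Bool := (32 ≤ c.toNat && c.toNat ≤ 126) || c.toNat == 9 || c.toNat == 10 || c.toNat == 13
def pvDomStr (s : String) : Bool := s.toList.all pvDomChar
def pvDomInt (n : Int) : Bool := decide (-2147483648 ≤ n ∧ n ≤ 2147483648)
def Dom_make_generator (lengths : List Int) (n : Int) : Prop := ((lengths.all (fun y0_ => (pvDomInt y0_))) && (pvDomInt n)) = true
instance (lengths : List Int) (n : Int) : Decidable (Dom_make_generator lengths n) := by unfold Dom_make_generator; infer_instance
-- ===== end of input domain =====

-- B builds each cycle's block as the identity segment rotated left by one via slicing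
-- (seg[1:]+seg[:1], no per-element modulo loop), padding with one identity-tail range
-- up to max(n, len(out)) (objective: alternative).

-- ===== PORT A =====
def make_generator (lengths : List Int) (n : Int) : List Int :=
  let st := lengths.foldl (fun (st : List Int × Int) length =>
      ((PySem.List.pyRange 0 length 1).foldl
          (fun l i => l ++ [PySem.Int.mod (i + 1) length + st.2 + 1]) st.1,
       st.2 + length)) ([], 0)
  (PySem.List.pyRange (st.1.length : Int) n 1).foldl (fun l i => l ++ [i + 1]) st.1

-- ===== PORT B =====
def make_generator_alt (lengths : List Int) (n : Int) : List Int :=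
  let st := lengths.foldl (fun (st : List Int × Int) length =>
      let seg := PySem.List.pyRange (st.2 + 1) (st.2 + length + 1) 1
      (st.1 ++ (PySem.List.slice seg (some 1) none ++ PySem.List.slice seg none (some 1)),
       st.2 + length)) ([], 0)
  st.1 ++ PySem.List.pyRange ((st.1.length : Int) + 1) (max n (st.1.length : Int) + 1) 1

-- ===== PRECONDITION & SPEC =====
def Spec_make_generator (lengths : List Int) (n : Int) (out : List Int) : Prop := out = make_generator_alt lengths n
instance (lengths : List Int) (n : Int) (out : List Int) : Decidable (Spec_make_generator lengths n out) := by unfold Spec_make_generator; infer_instance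

-- ===== CLAIM =====
def Claim_equal_make_generator : Prop := ∀ (lengths : List Int) (n : Int), Dom_make_generator lengths n → Spec_make_generator lengths n (make_generator lengths n)

-- ===== LEMMAS AND PROOFS =====

-- The rotated block both programs produce for one cycle starting after offset b.
def pvRot (b len : Int) : List Int :=
  if len ≤ 0 then [] else PySem.List.pyRange (b + 2) (b + len + 1) 1 ++ [b + 1]

-- The concatenation of all rotated blocks starting at offset b.
def pvBlocks (b : Int) : List Int → List Int
  | [] => []
  | len :: rest => pvRot b len ++ pvBlocks (b + len) rest

-- A's inner loop over range(length) appends exactly the rotated block.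
theorem pvA_inner (len b : Int) (l0 : List Int) :
    (PySem.List.pyRange 0 len 1).foldl (fun l i => l ++ [PySem.Int.mod (i + 1) len + b + 1]) l0
      = l0 ++ pvRot b len := by
  by_cases hz : len ≤ 0
  · simp [PySem.List.pyRange_one_eq_nil hz, pvRot, hz]
  · have hpos : 0 < len := by omega
    rw [PySem.List.foldl_append_singleton_eq_map]
    have hsplit : PySem.List.pyRange 0 len 1 = PySem.List.pyRange 0 (len - 1) 1 ++ [len - 1] := by
      have := PySem.List.pyRange_one_succ_right (a := 0) (b := len - 1) (by omega)
      simpa using this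
    rw [hsplit, List.map_append]
    have hlast : PySem.Int.mod len len = 0 := by
      rw [PySem.Int.mod_eq_emod_of_pos hpos]; simp
    have hmain : (PySem.List.pyRange 0 (len - 1) 1).map
        (fun i => PySem.Int.mod (i + 1) len + b + 1)
        = PySem.List.pyRange (b + 2) (b + len + 1) 1 := by
      rw [PySem.List.pyRange_one, PySem.List.pyRange_one, List.map_map]
      have he : ((b + len + 1) - (b + 2)).toNat = (len - 1 - 0).toNat := by omega
      rw [he]
      apply List.map_congr_left
      intro k hk
      have hk' : (k : Int) < len - 1 := by
        have := List.mem_range.mp hk; omega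
      simp only [Function.comp_apply]
      have hm : PySem.Int.mod (0 + (k : Int) + 1) len = 0 + (k : Int) + 1 := by
        rw [PySem.Int.mod_eq_emod_of_pos hpos]
        exact Int.emod_eq_of_lt (by omega) (by omega)
      rw [hm]; ring
    rw [hmain]
    simp [pvRot, not_le.mpr hpos, hlast]

-- A's outer loop from any state.
theorem pvA_outer (ls : List Int) (l0 : List Int) (b : Int) :
    ls.foldl (fun (st : List Int × Int) length =>
      ((PySem.List.pyRange 0 length 1).foldl
          (fun l i => l ++ [PySem.Int.mod (i + 1) length + st.2 + 1]) st.1,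
       st.2 + length)) (l0, b)
      = (l0 ++ pvBlocks b ls, b + ls.sum) := by
  induction ls generalizing l0 b with
  | nil => simp [pvBlocks]
  | cons len rest ih =>
      rw [List.foldl_cons, pvA_inner, ih]
      simp [pvBlocks, List.sum_cons, List.append_assoc]
      ring

-- One rotated-by-slicing identity segment is the rotated block.
theorem pvB_seg (len b : Int) :
    (PySem.List.slice (PySem.List.pyRange (b + 1) (b + len + 1) 1) (some 1) none
      ++ PySem.List.slice (PySem.List.pyRange (b + 1) (b + len + 1) 1) none (some 1))
      = pvRot b len := by
  by_cases hz : len ≤ 0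
  · simp [PySem.List.pyRange_one_eq_nil (by omega : b + len + 1 ≤ b + 1), pvRot, hz,
          PySem.List.slice_from_one]
    simp [PySem.List.slice]
  · have hcons : PySem.List.pyRange (b + 1) (b + len + 1) 1
        = (b + 1) :: PySem.List.pyRange (b + 2) (b + len + 1) 1 := by
      have := PySem.List.pyRange_one_cons (a := b + 1) (b := b + len + 1) (by omega)
      simpa [add_assoc] using this
    have ht : PySem.List.slice ((b + 1) :: PySem.List.pyRange (b + 2) (b + len + 1) 1)
        none (some 1) = [b + 1] := by
      rw [show (1:Int) = ((1:Nat):Int) by norm_num, PySem.List.slice_to_natCast]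
      simp
    rw [hcons, PySem.List.slice_from_one, ht]
    simp [pvRot, hz]

-- B's loop from any state.
theorem pvB_outer (ls : List Int) (l0 : List Int) (b : Int) :
    ls.foldl (fun (st : List Int × Int) length =>
      let seg := PySem.List.pyRange (st.2 + 1) (st.2 + length + 1) 1
      (st.1 ++ (PySem.List.slice seg (some 1) none ++ PySem.List.slice seg none (some 1)),
       st.2 + length)) (l0, b)
      = (l0 ++ pvBlocks b ls, b + ls.sum) := by
  induction ls generalizing l0 b with
  | nil => simp [pvBlocks]
  | cons len rest ih =>
      rw [List.foldl_cons]
      simp only []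
      rw [pvB_seg, ih]
      simp [pvBlocks, List.sum_cons, List.append_assoc]
      ring

-- Appending i+1 over a range shifts the range by one.
theorem pvShift (a c : Int) :
    (PySem.List.pyRange a c 1).map (fun i => i + 1) = PySem.List.pyRange (a + 1) (c + 1) 1 := by
  rw [PySem.List.pyRange_one, PySem.List.pyRange_one, List.map_map]
  have he : (c + 1 - (a + 1)).toNat = (c - a).toNat := by omega
  rw [he]
  apply List.map_congr_left
  intro k _
  simp only [Function.comp_apply]
  ring

-- The two identity tails coincide: max clamps exactly where the shifted range is empty.
theorem pvTail (L n : Int) (_hL : 0 ≤ L) :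
    PySem.List.pyRange (L + 1) (n + 1) 1 = PySem.List.pyRange (L + 1) (max n L + 1) 1 := by
  by_cases h : L ≤ n
  · rw [max_eq_left h]
  · rw [max_eq_right (by omega),
        PySem.List.pyRange_one_eq_nil (by omega : n + 1 ≤ L + 1),
        PySem.List.pyRange_one_eq_nil (by omega : L + 1 ≤ L + 1)]

-- ===== VERDICT =====
theorem make_generator_spec : Claim_equal_make_generator := by
  intro lengths n _
  show make_generator lengths n = make_generator_alt lengths n
  simp only [make_generator, make_generator_alt]
  rw [pvA_outer, pvB_outer, PySem.List.foldl_append_singleton_eq_map, pvShift,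
      pvTail _ _ (by positivity)]
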